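-- pv_equiv track=rewrite | github.com/cmescobar/Scripts_Magister | heart_sound_detection.py | find_potential_onset_offset
-- ===== SOURCE A (Python) =====
-- def find_potential_onset_offset(signal_in, det_type):
--     '''Función que permite encontrar los potenciales onsets basado en la
--     revisión de puntos adyacentes. Se revisa si es que el punto actual es
--     cero y el punto siguiente es distinto de cero. Si se cumple, es porque
--     se está en presencia de un "onset".
--     Referencias:
--     - Qingshu Liu, et.al. An automatic segmentation method for heart sounds.
--       2018. Biomedical Engineering.
--
--     Parámetros
--     - signal_in: Señal de entrada
--     - det_type: Opción para el tipo de salida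
--         - [onset]: Retorna los onset (inicio de sonidos cardíacos)
--         - [offset]: Retorna los offset (fin de sonidos cardíacos)
--         - [all]: Retorna tanto onsets como offsets
--     '''
--     if det_type == 'onset':
--         return [i for i in range(len(signal_in)-1)
--                 if signal_in[i] == 0 and signal_in[i+1] != 0]
--     elif det_type == 'offset':
--         return [i for i in range(1, len(signal_in))
--                 if signal_in[i-1] != 0 and signal_in[i] == 0]
--     elif det_type == 'all':
--         all_points = [i for i in range(len(signal_in)-1)
--                       if signal_in[i] == 0 and signal_in[i+1] != 0] + \
--                      [i for i in range(1, len(signal_in))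
--                       if signal_in[i-1] != 0 and signal_in[i] == 0]
--         # Ordenando
--         all_points.sort()
--         return all_points
--
--     else:
--         raise Exception('Opción seleccionada no es válida. Ingrese un tipo '
--                         'de salida disponible en las opciones.')
-- ===== SOURCE B (Python) =====
-- def find_potential_onset_offset(signal_in, det_type):
--     if det_type not in ('onset', 'offset', 'all'):
--         raise Exception('Opción seleccionada no es válida. Ingrese un tipo '
--                         'de salida disponible en las opciones.')
--     want_onset = det_type != 'offset'
--     want_offset = det_type != 'onset'
--     out = []
--     # single pass over adjacent pairs; emissions come out already sorted
--     for i, (a, b) in enumerate(zip(signal_in, signal_in[1:])):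
--         if a == 0 and b != 0:
--             if want_onset:
--                 out.append(i)
--         elif a != 0 and b == 0:
--             if want_offset:
--                 out.append(i + 1)
--     return out
-- ===== Notes on version B (the rewrite author's own statement) =====
-- stated objective: alternative
-- what changed: Replaces the per-branch index comprehensions and the concat-then-sort of the 'all' branch by a single left-to-right pass over adjacent pairs that emits onset index i and offset index i+1 in order, so no sort is needed.
-- outside the precondition, e.g. on find_potential_onset_offset([0, 1], 'bad'): A raises Exception, B raises Exception
import Mathlib
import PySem

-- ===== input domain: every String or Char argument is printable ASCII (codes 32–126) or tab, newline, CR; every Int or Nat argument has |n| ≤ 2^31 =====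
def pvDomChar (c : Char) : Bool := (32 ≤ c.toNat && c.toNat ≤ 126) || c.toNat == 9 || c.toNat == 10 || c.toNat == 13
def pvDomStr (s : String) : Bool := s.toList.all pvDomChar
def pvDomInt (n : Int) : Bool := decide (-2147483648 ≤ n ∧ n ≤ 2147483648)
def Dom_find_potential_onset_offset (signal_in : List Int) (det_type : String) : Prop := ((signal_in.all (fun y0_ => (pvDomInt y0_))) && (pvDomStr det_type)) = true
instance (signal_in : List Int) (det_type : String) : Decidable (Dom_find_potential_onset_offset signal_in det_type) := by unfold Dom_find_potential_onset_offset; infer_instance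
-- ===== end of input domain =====

-- B replaces A's per-branch index comprehensions and the concat-then-sort of the 'all' branch by one
-- left-to-right pass over adjacent pairs, whose emissions come out already sorted (objective: alternative).

-- ===== PORT A =====
def find_potential_onset_offset (signal_in : List Int) (det_type : String) : List Int :=
  if det_type = "onset" then
    (PySem.List.pyRange 0 (PySem.List.len signal_in - 1) 1).filter
      (fun i => PySem.List.pyGetD signal_in i 0 == 0 && PySem.List.pyGetD signal_in (i + 1) 0 != 0)
  else if det_type = "offset" then
    (PySem.List.pyRange 1 (PySem.List.len signal_in) 1).filter
      (fun i => PySem.List.pyGetD signal_in (i - 1) 0 != 0 && PySem.List.pyGetD signal_in i 0 == 0)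
  else if det_type = "all" then
    let all_points :=
      (PySem.List.pyRange 0 (PySem.List.len signal_in - 1) 1).filter
        (fun i => PySem.List.pyGetD signal_in i 0 == 0 && PySem.List.pyGetD signal_in (i + 1) 0 != 0) ++
      (PySem.List.pyRange 1 (PySem.List.len signal_in) 1).filter
        (fun i => PySem.List.pyGetD signal_in (i - 1) 0 != 0 && PySem.List.pyGetD signal_in i 0 == 0)
    PySem.List.sorted all_points (fun x => x) false
  else []  -- Python raises here; excluded by Pre_

-- ===== PORT B =====
-- the single pass of Source B: walk adjacent pairs (a, b) carrying the current index i
def pvAltGo (wantOn : Bool) (wantOff : Bool) (i : Int) : List Int → List Int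
  | a :: b :: t =>
      (if a == 0 && b != 0 then (if wantOn then [i] else [])
       else if a != 0 && b == 0 then (if wantOff then [i + 1] else [])
       else []) ++ pvAltGo wantOn wantOff (i + 1) (b :: t)
  | _ => []

def find_potential_onset_offset_alt (signal_in : List Int) (det_type : String) : List Int :=
  if det_type = "onset" ∨ det_type = "offset" ∨ det_type = "all" then
    pvAltGo (det_type ≠ "offset") (det_type ≠ "onset") 0 signal_in
  else []  -- Python raises here; excluded by Pre_

-- ===== PRECONDITION & SPEC =====
-- Pre_ excludes exactly the invalid det_type values, on which both A and B raise Exception.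
def Pre_find_potential_onset_offset (signal_in : List Int) (det_type : String) : Prop :=
  det_type = "onset" ∨ det_type = "offset" ∨ det_type = "all"
instance (signal_in : List Int) (det_type : String) : Decidable (Pre_find_potential_onset_offset signal_in det_type) := by unfold Pre_find_potential_onset_offset; infer_instance
def pvWitness_find_potential_onset_offset : List Int × String := ([0, 1, 1, 0, 2], "all")

def Spec_find_potential_onset_offset (signal_in : List Int) (det_type : String) (out : List Int) : Prop := out = find_potential_onset_offset_alt signal_in det_type
instance (signal_in : List Int) (det_type : String) (out : List Int) : Decidable (Spec_find_potential_onset_offset signal_in det_type out) := by unfold Spec_find_potential_onset_offset; infer_instance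

-- ===== CLAIM (what is proved, stated in full; the proofs are below) =====
def Claim_equal_find_potential_onset_offset : Prop := ∀ (signal_in : List Int) (det_type : String), Dom_find_potential_onset_offset signal_in det_type → Pre_find_potential_onset_offset signal_in det_type → Spec_find_potential_onset_offset signal_in det_type (find_potential_onset_offset signal_in det_type)

-- ===== LEMMAS AND PROOFS =====

theorem getD_cons (l : List Int) (a i d : Int) (h : 0 ≤ i) :
    PySem.List.pyGetD (a :: l) (i + 1) d = PySem.List.pyGetD l i d := by
  obtain ⟨n, rfl⟩ := Int.eq_ofNat_of_zero_le h
  have : ((n:Int)+1) = ((n+1:Nat):Int) := by push_cast; ring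
  rw [this, PySem.List.pyGetD_natCast, PySem.List.pyGetD_natCast]
  simp

theorem range_shift (m : Int) : PySem.List.pyRange 1 (m+1) 1 = (PySem.List.pyRange 0 m 1).map (· + 1) := by
  simp [PySem.List.pyRange_one, List.map_map]
  intro k _
  omega


theorem pvAltGo_shift (wOn wOff : Bool) (i : Int) (s : List Int) :
    pvAltGo wOn wOff i s = (pvAltGo wOn wOff 0 s).map (· + i) := by
  induction s generalizing i with
  | nil => simp [pvAltGo]
  | cons a t ih =>
    match t with
    | [] => simp [pvAltGo]
    | b :: t' =>
      rw [pvAltGo, pvAltGo, ih, ih (0+1), List.map_append, List.map_map]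
      congr 1
      · split_ifs <;> simp [Int.add_comm]
      · apply List.map_congr_left; intro x _; simp; ring

def pvOns : List Int → List Int
  | a :: b :: t => (if a == 0 && b != 0 then [0] else []) ++ (pvOns (b :: t)).map (· + 1)
  | _ => []

theorem pvOns_eq (s : List Int) :
    (PySem.List.pyRange 0 ((s.length : Int) - 1) 1).filter
      (fun i => PySem.List.pyGetD s i 0 == 0 && PySem.List.pyGetD s (i + 1) 0 != 0) = pvOns s := by
  induction s with
  | nil => simp [pvOns, PySem.List.pyRange_one_eq_nil]
  | cons a t ih =>
    match t with
    | [] => simp [pvOns, PySem.List.pyRange_one_eq_nil]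
    | b :: t' =>
      have hlen : (((a :: b :: t').length : Int)) - 1 = (t'.length : Int) + 1 := by
        simp only [List.length_cons]; push_cast; ring
      rw [hlen, PySem.List.pyRange_one_cons (by positivity), List.filter_cons]
      simp only [zero_add]
      rw [range_shift, List.filter_map]
      have hcong : ∀ i ∈ PySem.List.pyRange 0 (t'.length : Int) 1,
          ((fun i => PySem.List.pyGetD (a :: b :: t') i 0 == 0 &&
              PySem.List.pyGetD (a :: b :: t') (i + 1) 0 != 0) ∘ (· + 1)) i =
          (fun i => PySem.List.pyGetD (b :: t') i 0 == 0 &&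
              PySem.List.pyGetD (b :: t') (i + 1) 0 != 0) i := by
        intro i hi
        have h0 : 0 ≤ i := (PySem.List.mem_pyRange_one.mp hi).1
        simp only [Function.comp]
        rw [getD_cons _ _ _ _ h0, show i + 1 + 1 = (i + 1) + 1 from rfl,
            getD_cons _ _ _ _ (by omega)]
      rw [List.filter_congr hcong]
      have ihl : (((b :: t').length : Int)) - 1 = (t'.length : Int) := by simp only [List.length_cons]; push_cast; ring
      rw [ihl] at ih
      rw [ih, pvOns]
      have g1 : PySem.List.pyGetD (a :: b :: t') 1 0 = b := by
        rw [show (1:Int) = 0 + 1 from rfl, getD_cons _ _ _ _ le_rfl, PySem.List.pyGetD_zero_cons]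
      rw [PySem.List.pyGetD_zero_cons, g1]
      split_ifs with h <;> simp

theorem range_shift' (a b : Int) :
    PySem.List.pyRange (a + 1) (b + 1) 1 = (PySem.List.pyRange a b 1).map (· + 1) := by
  simp [PySem.List.pyRange_one, List.map_map]
  intro k _
  omega

def pvOffs : List Int → List Int
  | a :: b :: t => (if a != 0 && b == 0 then [1] else []) ++ (pvOffs (b :: t)).map (· + 1)
  | _ => []

theorem pvOffs_eq (s : List Int) :
    (PySem.List.pyRange 1 (s.length : Int) 1).filter
      (fun i => PySem.List.pyGetD s (i - 1) 0 != 0 && PySem.List.pyGetD s i 0 == 0) = pvOffs s := by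
  induction s with
  | nil => simp [pvOffs, PySem.List.pyRange_one_eq_nil]
  | cons a t ih =>
    match t with
    | [] => simp [pvOffs, PySem.List.pyRange_one_eq_nil]
    | b :: t' =>
      have hlen : (((a :: b :: t').length : Int)) = (t'.length : Int) + 2 := by
        simp only [List.length_cons]; push_cast; ring
      rw [hlen, PySem.List.pyRange_one_cons (by omega), List.filter_cons]
      rw [show ((t'.length : Int) + 2) = ((t'.length : Int) + 1) + 1 from by ring,
          show (1 : Int) + 1 = 1 + 1 from rfl, range_shift', List.filter_map]
      have hcong : ∀ i ∈ PySem.List.pyRange 1 ((t'.length : Int) + 1) 1,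
          ((fun i => PySem.List.pyGetD (a :: b :: t') (i - 1) 0 != 0 &&
              PySem.List.pyGetD (a :: b :: t') i 0 == 0) ∘ (· + 1)) i =
          (fun i => PySem.List.pyGetD (b :: t') (i - 1) 0 != 0 &&
              PySem.List.pyGetD (b :: t') i 0 == 0) i := by
        intro i hi
        have h1 : 1 ≤ i := (PySem.List.mem_pyRange_one.mp hi).1
        simp only [Function.comp]
        obtain ⟨j, rfl⟩ : ∃ j, i = j + 1 := ⟨i - 1, by ring⟩
        have e1 : j + 1 + 1 - 1 = j + 1 := by ring
        have e2 : j + 1 - 1 = j := by ring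
        rw [e1, e2, getD_cons _ _ _ _ (by omega), getD_cons _ _ _ _ (by omega)]
      rw [List.filter_congr hcong]
      have ihl : (((b :: t').length : Int)) = (t'.length : Int) + 1 := by
        simp only [List.length_cons]; push_cast; ring
      rw [ihl] at ih
      rw [ih, pvOffs]
      have g0 : PySem.List.pyGetD (a :: b :: t') ((1:Int) - 1) 0 = a := by
        norm_num [PySem.List.pyGetD_zero_cons]
      have g1 : PySem.List.pyGetD (a :: b :: t') 1 0 = b := by
        rw [show (1:Int) = 0 + 1 from rfl, getD_cons _ _ _ _ le_rfl, PySem.List.pyGetD_zero_cons]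
      rw [g0, g1]
      split_ifs with h <;> simp

theorem pvAltGo_on (s : List Int) : pvAltGo true false 0 s = pvOns s := by
  induction s with
  | nil => simp [pvAltGo, pvOns]
  | cons a t ih =>
    match t with
    | [] => simp [pvAltGo, pvOns]
    | b :: t' =>
      rw [pvAltGo, pvAltGo_shift, ih, pvOns]
      congr 1
      split_ifs <;> simp_all

theorem pvAltGo_off (s : List Int) : pvAltGo false true 0 s = pvOffs s := by
  induction s with
  | nil => simp [pvAltGo, pvOffs]
  | cons a t ih =>
    match t with
    | [] => simp [pvAltGo, pvOffs]
    | b :: t' =>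
      rw [pvAltGo, pvAltGo_shift, ih, pvOffs]
      congr 1
      split_ifs <;> simp_all

theorem pvAltGo_all_perm (s : List Int) :
    (pvAltGo true true 0 s).Perm (pvOns s ++ pvOffs s) := by
  induction s with
  | nil => simp [pvAltGo, pvOns, pvOffs]
  | cons a t ih =>
    match t with
    | [] => simp [pvAltGo, pvOns, pvOffs]
    | b :: t' =>
      rw [pvAltGo, pvAltGo_shift, pvOns, pvOffs, List.perm_iff_count]
      intro x
      have hc := ((ih).map (· + 1)).count_eq x
      simp only [List.map_append, List.count_append] at hc ⊢
      split_ifs <;> simp_all <;> omega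

theorem pvAltGo_lb (wOn wOff : Bool) (i : Int) (s : List Int) :
    ∀ x ∈ pvAltGo wOn wOff i s, i ≤ x := by
  induction s generalizing i with
  | nil => simp [pvAltGo]
  | cons a t ih =>
    match t with
    | [] => simp [pvAltGo]
    | b :: t' =>
      intro x hx
      rw [pvAltGo, List.mem_append] at hx
      rcases hx with hx | hx
      · split_ifs at hx <;> simp_all
      · have := ih (i + 1) x hx
        omega

theorem pvAltGo_all_pairwise (wOn wOff : Bool) (i : Int) (s : List Int) :
    (pvAltGo wOn wOff i s).Pairwise (· ≤ ·) := by
  induction s generalizing i with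
  | nil => simp [pvAltGo]
  | cons a t ih =>
    match t with
    | [] => simp [pvAltGo]
    | b :: t' =>
      rw [pvAltGo]
      apply List.pairwise_append.mpr
      refine ⟨?_, ih (i + 1), ?_⟩
      · split_ifs <;> simp
      · intro x hx y hy
        have := pvAltGo_lb wOn wOff (i + 1) (b :: t') y hy
        split_ifs at hx <;> (simp_all; try omega)

theorem pvAll_eq (s : List Int) :
    PySem.List.sorted (pvOns s ++ pvOffs s) (fun x => x) false = pvAltGo true true 0 s := by
  exact ((PySem.List.sorted_perm (pvOns s ++ pvOffs s) (fun x => x) false).trans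
      (pvAltGo_all_perm s).symm).eq_of_pairwise
    (fun a b _ _ hab hba => le_antisymm hab hba)
    (PySem.List.sorted_pairwise (pvOns s ++ pvOffs s) (fun x => x))
    (pvAltGo_all_pairwise true true 0 s)

-- ===== VERDICT (by name: the statement is the Claim_ definition above) =====
theorem find_potential_onset_offset_spec : Claim_equal_find_potential_onset_offset := by
  intro s det _ hpre
  unfold Spec_find_potential_onset_offset find_potential_onset_offset find_potential_onset_offset_alt
  rcases hpre with h | h | h <;> subst h <;> simp
  · rw [pvOns_eq, ← pvAltGo_on]
  · rw [pvOffs_eq, ← pvAltGo_off]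
  · rw [pvOns_eq, pvOffs_eq, pvAll_eq]
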